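-- pv_equiv track=rewrite | github.com/Akvarion/simod_docker | ros2_ws/src/ps_try/scripts/bt_ros2_demo-xml.py | _pick_side_ee_link_index
-- ===== SOURCE A (Python) =====
-- from typing import Dict, List, Optional
--
-- def _pick_side_ee_link_index(link_names: List[str], side: str) -> Optional[int]:
--     side = str(side).lower()
--     token = "ur_left_paletta" if side == "left" else "ur_right_paletta"
--     if not link_names:
--         return None
--     lowered = [str(n).lower() for n in link_names]
--
--     # 1) exact suffix match (model::link)
--     for i, name in enumerate(lowered):
--         if name.endswith(f"::{token}") or name == token:
--             return i
--     # 2) contains fallback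
--     for i, name in enumerate(lowered):
--         if token in name:
--             return i
--     return None
-- ===== SOURCE B (Python) =====
-- from typing import List, Optional
--
-- def _pick_side_ee_link_index(link_names: List[str], side: str) -> Optional[int]:
--     token = "ur_left_paletta" if str(side).lower() == "left" else "ur_right_paletta"
--     suffix = "::" + token
--     first_contains = None
--     for i, n in enumerate(link_names):
--         name = str(n).lower()
--         if name == token or name.endswith(suffix):
--             return i
--         if first_contains is None and token in name:
--             first_contains = i
--     return first_contains
-- ===== Notes on version B (the rewrite author's own statement) =====
-- stated objective: alternative
-- what changed: Replaced A's two sequential enumerate scans over a pre-built lowered list with a single pass that lowers each name on the fly, returns immediately on a suffix/exact match, and carries a first_contains accumulator returned at the end (the empty-list guard disappears).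
import Mathlib
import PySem

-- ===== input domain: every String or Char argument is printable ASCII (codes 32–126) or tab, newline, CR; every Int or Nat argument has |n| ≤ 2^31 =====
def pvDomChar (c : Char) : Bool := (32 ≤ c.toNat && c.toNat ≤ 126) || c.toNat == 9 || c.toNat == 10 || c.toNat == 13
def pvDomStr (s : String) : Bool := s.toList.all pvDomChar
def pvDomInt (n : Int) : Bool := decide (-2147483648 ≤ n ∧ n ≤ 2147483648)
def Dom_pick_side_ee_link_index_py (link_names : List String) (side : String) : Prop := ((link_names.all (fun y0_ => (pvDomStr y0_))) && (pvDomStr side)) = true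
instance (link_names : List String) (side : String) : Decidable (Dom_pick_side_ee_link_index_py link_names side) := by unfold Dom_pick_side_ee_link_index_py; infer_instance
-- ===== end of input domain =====

-- ===== PORT A =====
-- B does one pass with a first_contains accumulator instead of A's two scans (alternative decomposition, same cost).

-- A's pass 1: exact suffix match (name.endswith("::"+token) or name == token), early return of index
def pvA_loop1 (names : List String) (i : Int) (token : String) : Option Int :=
  match names with
  | [] => none
  | name :: rest =>
      if PySem.Str.endswith name ("::" ++ token) || name == token then some i
      else pvA_loop1 rest (i + 1) token

-- A's pass 2: contains fallback (token in name), early return of index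
def pvA_loop2 (names : List String) (i : Int) (token : String) : Option Int :=
  match names with
  | [] => none
  | name :: rest =>
      if PySem.Str.isIn token name then some i
      else pvA_loop2 rest (i + 1) token

def pick_side_ee_link_index_py (link_names : List String) (side : String) : Option Int :=
  let side := PySem.Str.lower side
  let token := if side == "left" then "ur_left_paletta" else "ur_right_paletta"
  if link_names = [] then none
  else
    let lowered := link_names.map PySem.Str.lower
    match pvA_loop1 lowered 0 token with
    | some i => some i
    | none => pvA_loop2 lowered 0 token

-- ===== PORT B =====
-- B's single pass: early return on suffix/exact match, first_contains accumulator otherwise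
def pvB_loop (names : List String) (i : Int) (token suffix : String) (firstContains : Option Int) : Option Int :=
  match names with
  | [] => firstContains
  | n :: rest =>
      let name := PySem.Str.lower n
      if name == token || PySem.Str.endswith name suffix then some i
      else pvB_loop rest (i + 1) token suffix
             (if firstContains.isNone && PySem.Str.isIn token name then some i else firstContains)

def pick_side_ee_link_index_py_alt (link_names : List String) (side : String) : Option Int :=
  let token := if PySem.Str.lower side == "left" then "ur_left_paletta" else "ur_right_paletta"
  let suffix := "::" ++ token
  pvB_loop link_names 0 token suffix none

-- ===== PRECONDITION & SPEC =====
def Spec_pick_side_ee_link_index_py (link_names : List String) (side : String) (out : Option Int) : Prop := out = pick_side_ee_link_index_py_alt link_names side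
instance (link_names : List String) (side : String) (out : Option Int) : Decidable (Spec_pick_side_ee_link_index_py link_names side out) := by unfold Spec_pick_side_ee_link_index_py; infer_instance

-- ===== CLAIM (what is proved, stated in full; the proofs are below) =====
def Claim_equal_pick_side_ee_link_index_py : Prop := ∀ (link_names : List String) (side : String), Dom_pick_side_ee_link_index_py link_names side → Spec_pick_side_ee_link_index_py link_names side (pick_side_ee_link_index_py link_names side)

-- ===== LEMMAS AND PROOFS =====

-- B's single pass equals: A's pass 1 on the lowered names, falling back to the accumulator
-- if set, else to A's pass 2.
theorem pvB_loop_eq (names : List String) (i : Int) (token : String) (fc : Option Int) :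
    pvB_loop names i token ("::" ++ token) fc =
      match pvA_loop1 (names.map PySem.Str.lower) i token with
      | some j => some j
      | none =>
          match fc with
          | some k => some k
          | none => pvA_loop2 (names.map PySem.Str.lower) i token := by
  induction names generalizing i fc with
  | nil => cases fc <;> simp [pvB_loop, pvA_loop1, pvA_loop2]
  | cons n rest ih =>
      simp only [pvB_loop, pvA_loop1, pvA_loop2, List.map_cons]
      rw [Bool.or_comm (PySem.Str.lower n == token)]
      cases hC : (PySem.Str.endswith (PySem.Str.lower n) ("::" ++ token) || PySem.Str.lower n == token) with
      | true => simp
      | false =>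
          simp only [Bool.false_eq_true, if_false, ih]
          cases fc with
          | some k =>
              cases h : pvA_loop1 (rest.map PySem.Str.lower) (i + 1) token <;> simp
          | none =>
              cases h : pvA_loop1 (rest.map PySem.Str.lower) (i + 1) token <;>
                cases h2 : PySem.Str.isIn token (PySem.Str.lower n) <;> simp

theorem pick_side_ee_link_index_py_spec' (link_names : List String) (side : String) :
    pick_side_ee_link_index_py link_names side = pick_side_ee_link_index_py_alt link_names side := by
  cases link_names with
  | nil => rfl
  | cons n rest =>
      simp only [pick_side_ee_link_index_py, pick_side_ee_link_index_py_alt, pvB_loop_eq]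
      simp

-- ===== VERDICT (by name: the statement is the Claim_ definition above) =====
theorem pick_side_ee_link_index_py_spec : Claim_equal_pick_side_ee_link_index_py := by
  intro link_names side _
  unfold Spec_pick_side_ee_link_index_py
  exact pick_side_ee_link_index_py_spec' link_names side
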